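-- pv_equiv track=rewrite | github.com/Gri-Kli/pythonProject | Grigory Klimov les_5/task_5_4.py | num_sor
-- ===== SOURCE A (Python) =====
-- def num_sor(src):
--     x = src[0]
--     for num in src:
--         if num > x:
--             x = num
--             yield num
--         else:
--             x = num
-- ===== SOURCE B (Python) =====
-- def num_sor(src):
--     # reverse traversal: collect the rises back-to-front, then emit them in order
--     rev = []
--     for i in range(len(src) - 1, 0, -1):
--         if src[i] > src[i - 1]:
--             rev.append(src[i])
--     yield from reversed(rev)
-- ===== Notes on version B (the rewrite author's own statement) =====
-- stated objective: alternative
-- what changed: Replaces A's forward single pass with a running state variable by a reverse index traversal that collects the rising elements back-to-front into a list and then emits that list reversed.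
import Mathlib
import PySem

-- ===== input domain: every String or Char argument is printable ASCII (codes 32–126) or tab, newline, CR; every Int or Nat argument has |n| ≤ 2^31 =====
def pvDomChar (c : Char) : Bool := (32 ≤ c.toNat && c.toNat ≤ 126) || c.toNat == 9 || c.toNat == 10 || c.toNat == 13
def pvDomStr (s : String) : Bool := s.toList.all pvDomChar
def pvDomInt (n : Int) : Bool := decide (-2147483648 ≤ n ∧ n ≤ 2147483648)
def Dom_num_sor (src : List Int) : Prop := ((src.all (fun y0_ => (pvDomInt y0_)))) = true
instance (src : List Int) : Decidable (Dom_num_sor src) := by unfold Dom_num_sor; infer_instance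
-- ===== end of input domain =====

-- B replaces A's forward stateful pass by a reverse index traversal collecting rises back-to-front, then reversing (alternative); A raises on the empty list, which Pre_ excludes.


-- ===== PORT A =====
-- A's loop: state x (reassigned every step), yield num when num > x
def numSorLoop (x : Int) : List Int → List Int
  | [] => []
  | n :: t => if n > x then n :: numSorLoop n t else numSorLoop n t

def num_sor (src : List Int) : List Int :=
  match PySem.List.pyGet? src 0 with   -- src[0]; none = IndexError, excluded by Pre_
  | none => []
  | some x => numSorLoop x src

-- ===== PORT B =====
-- rev = []; for i in range(len(src)-1, 0, -1): if src[i] > src[i-1]: rev.append(src[i]); yield from reversed(rev)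
def num_sor_alt (src : List Int) : List Int :=
  let rev :=
    (PySem.List.pyRange ((src.length : Int) - 1) 0 (-1)).foldl
      (fun acc i =>
        if PySem.List.pyGetD src i 0 > PySem.List.pyGetD src (i - 1) 0
        then acc ++ [PySem.List.pyGetD src i 0] else acc) []
  rev.reverse

-- ===== PRECONDITION & SPEC =====
-- A reads src[0] before looping and raises IndexError on the empty list.
def Pre_num_sor (src : List Int) : Prop := src ≠ []
instance (src : List Int) : Decidable (Pre_num_sor src) := by unfold Pre_num_sor; infer_instance
def pvWitness_num_sor : List Int := [1, 3, 2]

def Spec_num_sor (src : List Int) (out : List Int) : Prop := out = num_sor_alt src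
instance (src : List Int) (out : List Int) : Decidable (Spec_num_sor src out) := by unfold Spec_num_sor; infer_instance

-- ===== CLAIM =====
def Claim_equal_num_sor : Prop := ∀ (src : List Int), Dom_num_sor src → Pre_num_sor src → Spec_num_sor src (num_sor src)

-- ===== LEMMAS AND PROOFS =====
-- A's loop started in state n equals the pairwise selection on n :: t
theorem numSorLoop_eq_pairs (t : List Int) : ∀ n : Int,
    numSorLoop n t = ((n :: t).zip t).filterMap (fun p => if p.2 > p.1 then some p.2 else none) := by
  induction t with
  | nil => intro n; simp [numSorLoop]
  | cons m t' ih =>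
      intro n
      simp only [numSorLoop, List.zip_cons_cons, List.filterMap_cons]
      rw [ih m]
      by_cases h : m > n <;> simp [h]

-- the index pairs (src[i-1], src[i]) for i in range(1, n) are the adjacent pairs
theorem map_idx_pairs (src : List Int) :
    (PySem.List.pyRange 1 (src.length : Int) 1).map
      (fun i => (PySem.List.pyGetD src (i - 1) 0, PySem.List.pyGetD src i 0))
      = src.zip src.tail := by
  apply List.ext_getElem
  · simp [PySem.List.length_pyRange_one, List.length_zip, List.length_tail]
  · intro k h1 h2
    have hk : k < src.length - 1 := by
      simpa [PySem.List.length_pyRange_one] using h1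
    have hr : (PySem.List.pyRange 1 (src.length : Int) 1)[k]'(by simpa using h1) = 1 + (k : Int) :=
      PySem.List.getElem_pyRange_one ..
    simp only [List.getElem_map, hr, List.getElem_zip]
    have e1 : (1 : Int) + (k : Int) - 1 = ((k : Nat) : Int) := by omega
    have e2 : (1 : Int) + (k : Int) = (((k + 1 : Nat)) : Int) := by push_cast; omega
    rw [e1, e2, PySem.List.pyGetD_natCast, PySem.List.pyGetD_natCast,
        List.getD_eq_getElem _ _ (by omega), List.getD_eq_getElem _ _ (by omega)]
    simp [List.getElem_tail]

-- filter-then-map as a filterMap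
theorem filterMap_ite (p : Int → Prop) [DecidablePred p] (g : Int → Int) (l : List Int) :
    l.filterMap (fun i => if p i then some (g i) else none) = (l.filter (fun i => decide (p i))).map g := by
  induction l with
  | nil => rfl
  | cons a t ih => by_cases h : p a <;> simp [h, ih]

-- ===== VERDICT =====
theorem num_sor_spec : Claim_equal_num_sor := by
  intro src _ hpre
  unfold Spec_num_sor num_sor num_sor_alt
  match src, hpre with
  | x :: t, _ =>
      simp only [PySem.List.pyGet?]
      norm_num [PySem.List.pyIdx?]
      rw [show PySem.List.pyRange ((t.length : Int)) 0 (-1)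
            = (PySem.List.pyRange 1 ((t.length : Int) + 1) 1).reverse by
          simpa using PySem.List.pyRange_neg_one_eq_reverse ((t.length : Int)) 0]
      have hfold := PySem.List.foldl_append_if
        (fun i => decide (PySem.List.pyGetD (x :: t) (i - 1) 0 < PySem.List.pyGetD (x :: t) i 0))
        (fun i => PySem.List.pyGetD (x :: t) i 0)
        ((PySem.List.pyRange 1 ((t.length : Int) + 1) 1).reverse) []
      simp only [decide_eq_true_eq] at hfold
      rw [hfold]
      simp only [List.nil_append, List.filter_reverse, List.map_reverse, List.reverse_reverse]
      rw [← filterMap_ite (fun i => PySem.List.pyGetD (x :: t) (i - 1) 0 < PySem.List.pyGetD (x :: t) i 0)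
            (fun i => PySem.List.pyGetD (x :: t) i 0)]
      have hlen : ((t.length : Int) + 1) = ((x :: t).length : Int) := by
        simp
      rw [hlen]
      have hpairs := map_idx_pairs (x :: t)
      calc numSorLoop x (x :: t)
          = numSorLoop x t := by simp [numSorLoop]
        _ = ((x :: t).zip t).filterMap (fun p => if p.2 > p.1 then some p.2 else none) :=
            numSorLoop_eq_pairs t x
        _ = (((PySem.List.pyRange 1 ((x :: t).length : Int) 1).map
              (fun i => (PySem.List.pyGetD (x :: t) (i - 1) 0, PySem.List.pyGetD (x :: t) i 0))).filterMap
              (fun p => if p.2 > p.1 then some p.2 else none)) := by rw [hpairs]; rfl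
        _ = (PySem.List.pyRange 1 ((x :: t).length : Int) 1).filterMap
              (fun i => if PySem.List.pyGetD (x :: t) (i - 1) 0 < PySem.List.pyGetD (x :: t) i 0
                        then some (PySem.List.pyGetD (x :: t) i 0) else none) := by
            rw [List.filterMap_map]; rfl
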